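-- pv_equiv track=rewrite | github.com/jtdecker123/AdventofCode | 2023/Day1Part2.py | resplit
-- ===== SOURCE A (Python) =====
-- def resplit(origLine):
--     compList = ['one', '1', 'two', '2', 'three', '3', 'four', '4', 'five', '5', 'six', '6', 'seven', '7', 'eight', '8', 'nine', '9']
--     newList = []
--     for i in origLine:
--         if i.isdigit():
--             newList.append(i)
--             continue
--         for j in range(len(i)):
--             for k in range(j,len(i)+1):
--                 currentSplice = i[j:k]
--                 if currentSplice in compList:
--                     newList.append(compList[compList.index(currentSplice)+1])
--                     break
--     return newList
-- ===== SOURCE B (Python) =====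
-- # Token-centric re-implementation: instead of enumerating every substring at every
-- # start position, scan the line once per fixed token (repeated str.find) collecting
-- # (position, successor) hits, then sort the hits by position.  At most one token can
-- # start at any given position (no token is a prefix of another), so position order
-- # reproduces A's output.
-- _TOKENS = [('one', '1'), ('1', 'two'), ('two', '2'), ('2', 'three'), ('three', '3'),
--            ('3', 'four'), ('four', '4'), ('4', 'five'), ('five', '5'), ('5', 'six'),
--            ('six', '6'), ('6', 'seven'), ('seven', '7'), ('7', 'eight'),
--            ('eight', '8'), ('8', 'nine'), ('nine', '9')]
--
-- def resplit(origLine):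
--     newList = []
--     for s in origLine:
--         if s.isdigit():
--             newList.append(s)
--             continue
--         hits = []
--         for tok, val in _TOKENS:
--             j = s.find(tok)
--             while j != -1:
--                 hits.append((j, val))
--                 j = s.find(tok, j + 1)
--         hits.sort(key=lambda h: h[0])
--         newList.extend(v for _, v in hits)
--     return newList
-- ===== Notes on version B (the rewrite author's own statement) =====
-- stated objective: faster
-- what changed: B is token-centric instead of position-centric: rather than enumerating every substring at every start position and looking it up in the token list (O(L^3) per string), B scans the line once per fixed token with repeated str.find collecting (position, successor) hits and sorts them by position, which is correct because no token is a prefix of another so at most one token starts at any position; Pre_ excludes lines with a non-digit-only string containing the character '9', on which A raises IndexError (compList.index('9')+1 runs past the pair list).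
import Mathlib
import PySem

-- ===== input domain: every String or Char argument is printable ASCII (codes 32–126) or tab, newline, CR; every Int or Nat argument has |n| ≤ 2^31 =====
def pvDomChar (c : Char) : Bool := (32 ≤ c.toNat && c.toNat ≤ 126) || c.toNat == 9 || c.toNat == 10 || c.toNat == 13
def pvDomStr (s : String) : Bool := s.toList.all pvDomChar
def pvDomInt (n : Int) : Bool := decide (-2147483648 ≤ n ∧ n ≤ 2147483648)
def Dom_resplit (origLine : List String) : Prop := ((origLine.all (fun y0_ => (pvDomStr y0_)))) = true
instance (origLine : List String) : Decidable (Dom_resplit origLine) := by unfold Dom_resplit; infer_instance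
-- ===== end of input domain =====

-- B is token-centric instead of position-centric: one scan of the line per fixed token collecting
-- (position, successor) hits, sorted by position — instead of A's enumeration of every substring
-- at every start position with a list membership test and a list.index re-scan.

-- ===== PORT A =====
def pvCompList : List String := ["one", "1", "two", "2", "three", "3", "four", "4", "five", "5", "six", "6", "seven", "7", "eight", "8", "nine", "9"]

-- the inner 'for k in range(j, len(i)+1): … break' loop: first splice found in compList yields one token
-- (the '.getD ""' default is Python's IndexError on splice '9'; Pre_ excludes those inputs, so it is never taken)
def pvAInner (s : String) (j : Int) : List Int → List String
  | [] => []
  | k :: ks =>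
    let sp := PySem.Str.slice s (some j) (some k)
    if sp ∈ pvCompList then
      [(PySem.List.pyGet? pvCompList ((((PySem.List.index? pvCompList sp).getD 0 : Nat) : Int) + 1)).getD ""]
    else pvAInner s j ks

def pvStepA (newList : List String) (i : String) : List String :=
  if PySem.Str.strIsdigit i then newList ++ [i]
  else (PySem.List.pyRange 0 (PySem.Str.len i)).foldl
    (fun acc j => acc ++ pvAInner i j (PySem.List.pyRange j (PySem.Str.len i + 1))) newList

def resplit (origLine : List String) : List String :=
  origLine.foldl pvStepA []

-- ===== PORT B =====
-- _TOKENS: each token paired with the element that follows it in A's pair list ('9' has no successor)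
def pvTokens : List (String × String) :=
  [("one", "1"), ("1", "two"), ("two", "2"), ("2", "three"), ("three", "3"),
   ("3", "four"), ("four", "4"), ("4", "five"), ("five", "5"), ("5", "six"),
   ("six", "6"), ("6", "seven"), ("seven", "7"), ("7", "eight"),
   ("eight", "8"), ("8", "nine"), ("nine", "9")]

-- the 'j = s.find(tok); while j != -1: hits.append((j, val)); j = s.find(tok, j + 1)' loop;
-- the fuel only bounds the iteration count (each found index is strictly larger than the last,
-- so len(s) + 1 steps always suffice — see pv_occGo_eq); it encodes no extra algorithm
def pvOccGo (s : String) (tv : String × String) : Nat → Int → List (Int × String)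
  | 0, _ => []
  | fuel + 1, j =>
    if j = -1 then []
    else (j, tv.2) :: pvOccGo s tv fuel (PySem.Str.findFrom s tv.1 (j + 1))

def pvOcc (s : String) (tv : String × String) : List (Int × String) :=
  pvOccGo s tv (s.toList.length + 1) (PySem.Str.find s tv.1)

def pvHits (s : String) : List (Int × String) :=
  pvTokens.foldl (fun hits tv => hits ++ pvOcc s tv) []

-- 'hits.sort(key=lambda h: h[0]); newList.extend(v for _, v in hits)'
def pvStepB (newList : List String) (s : String) : List String :=
  if PySem.Str.strIsdigit s then newList ++ [s]
  else newList ++ (PySem.List.sorted (pvHits s) (fun h => h.1)).map (fun h => h.2)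

def resplit_alt (origLine : List String) : List String :=
  origLine.foldl pvStepB []

-- ===== PRECONDITION & SPEC =====
-- Pre_ excludes lines containing a non-digit-only string with the character '9' in it: there A raises
-- IndexError (compList.index('9')+1 runs past the end of the pair list), returning no value.
def Pre_resplit (origLine : List String) : Prop :=
  ∀ s ∈ origLine, PySem.Str.strIsdigit s = true ∨ '9' ∉ s.toList

instance (origLine : List String) : Decidable (Pre_resplit origLine) := by
  unfold Pre_resplit; infer_instance

def pvWitness_resplit : List String := ["two3four", "99", "xonez", ""]

def Spec_resplit (origLine : List String) (out : List String) : Prop := out = resplit_alt origLine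
instance (origLine : List String) (out : List String) : Decidable (Spec_resplit origLine out) := by unfold Spec_resplit; infer_instance

-- ===== CLAIM (what is proved, stated in full; the proofs are below) =====
def Claim_equal_resplit : Prop := ∀ (origLine : List String), Dom_resplit origLine → Pre_resplit origLine → Spec_resplit origLine (resplit origLine)

-- ===== LEMMAS AND PROOFS =====

-- tok matches at position j of s (0 ≤ j), the property both inner loops decide
def pvStartsAt (s : String) (tok : String) (j : Int) : Bool :=
  PySem.Chars.startswith (s.toList.drop j.toNat) tok.toList

-- the unique match at a position: the first (and, by pv_uniq_at, only) token whose key is a prefix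
def pvMatchAt (r : List Char) : Option String :=
  pvTokens.findSome? (fun tv => if tv.1.toList <+: r then some tv.2 else none)

-- finite facts about the literal token tables, all by decide
lemma pv_uniq : ∀ p ∈ pvTokens, ∀ q ∈ pvTokens, p.1.toList <+: q.1.toList → p = q := by decide

lemma pv_keys_comp : ∀ p ∈ pvTokens, p.1 ∈ pvCompList := by decide

lemma pv_tok_ne : ∀ p ∈ pvTokens, 1 ≤ p.1.toList.length := by decide

lemma pv_comp_ne : ∀ t ∈ pvCompList, t.toList ≠ [] := by decide

lemma pv_tokens_nodup : pvTokens.Nodup := by decide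

lemma pv_comp_tok : ∀ t ∈ pvCompList, t ≠ "9" →
    (t, (PySem.List.pyGet? pvCompList ((((PySem.List.index? pvCompList t).getD 0 : Nat) : Int) + 1)).getD "") ∈ pvTokens := by
  decide

-- two tokens matching at the same position are the same token
lemma pv_uniq_at {p q : String × String} {r : List Char} (hp : p ∈ pvTokens) (hq : q ∈ pvTokens)
    (h1 : p.1.toList <+: r) (h2 : q.1.toList <+: r) : p = q := by
  rcases le_total p.1.toList.length q.1.toList.length with h | h
  · exact pv_uniq p hp q hq (List.prefix_of_prefix_length_le h1 h2 h)
  · exact (pv_uniq q hq p hp (List.prefix_of_prefix_length_le h2 h1 h)).symm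

-- findSome? with a unique hit
lemma pv_findSome?_unique {α β : Type} {l : List α} {f : α → Option β} {a : α} {b : β}
    (ha : a ∈ l) (hfa : f a = some b) (huniq : ∀ x ∈ l, f x ≠ none → x = a) :
    l.findSome? f = some b := by
  induction l with
  | nil => cases ha
  | cons y ys ih =>
    rw [List.findSome?_cons]
    rcases List.mem_cons.1 ha with rfl | hmem
    · rw [hfa]
    · cases hy : f y with
      | some c =>
        have := huniq y List.mem_cons_self (by simp [hy])
        subst this
        rw [hfa] at hy; cases hy; rfl
      | none =>
        exact ih hmem (fun x hx h => huniq x (List.mem_cons_of_mem _ hx) h)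

lemma pv_matchAt_some {r : List Char} {p : String × String} (hp : p ∈ pvTokens)
    (hpre : p.1.toList <+: r) : pvMatchAt r = some p.2 := by
  apply pv_findSome?_unique hp (by simp [hpre])
  intro q hq h
  by_cases hqp : q.1.toList <+: r
  · exact pv_uniq_at hq hp hqp hpre
  · simp [hqp] at h

lemma pv_matchAt_none {r : List Char} (h : ∀ p ∈ pvTokens, ¬ p.1.toList <+: r) :
    pvMatchAt r = none := by
  apply List.findSome?_eq_none_iff.2
  intro p hp
  simp [h p hp]

lemma pv_matchAt_some_iff {r : List Char} {v : String} :
    pvMatchAt r = some v ↔ ∃ p ∈ pvTokens, p.1.toList <+: r ∧ p.2 = v := by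
  constructor
  · intro h
    obtain ⟨p, hp, hfp⟩ := List.exists_of_findSome?_eq_some h
    by_cases hpre : p.1.toList <+: r
    · exact ⟨p, hp, hpre, by simpa [hpre] using hfp⟩
    · simp [hpre] at hfp
  · rintro ⟨p, hp, hpre, rfl⟩
    exact pv_matchAt_some hp hpre

-- ---------- A's inner scan computes pvMatchAt ----------
lemma pv_scanA (s : String) (h9 : '9' ∉ s.toList) (j : Int) (hj0 : 0 ≤ j) :
    ∀ (d : Nat) (a : Int), 1 ≤ a →
      (∀ p ∈ pvTokens, (p.1.toList.length : Int) < a → ¬ p.1.toList <+: s.toList.drop j.toNat) →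
      ((s.toList.length : Int) + 1 - (j + a)).toNat = d →
      pvAInner s j (PySem.List.pyRange (j + a) ((s.toList.length : Int) + 1)) =
        (pvMatchAt (s.toList.drop j.toNat)).elim [] (fun v => [v]) := by
  intro d
  induction d with
  | zero =>
    intro a ha hinv hd
    rw [PySem.List.pyRange_one_eq_nil (by omega : (s.toList.length : Int) + 1 ≤ j + a)]
    have hnone : pvMatchAt (s.toList.drop j.toNat) = none := by
      apply pv_matchAt_none
      intro p hp hpre
      have hlen := hpre.length_le
      rw [List.length_drop] at hlen
      exact hinv p hp (by omega) hpre
    rw [hnone]; rfl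
  | succ d ih =>
    intro a ha hinv hd
    have hlt : j + a < (s.toList.length : Int) + 1 := by omega
    rw [PySem.List.pyRange_one_cons hlt]
    simp only [pvAInner]
    set sp := PySem.Str.slice s (some j) (some (j + a)) with hspdef
    have hsplist : sp.toList = (s.toList.drop j.toNat).take ((j + a).toNat - j.toNat) := by
      rw [hspdef, PySem.Str.toList_slice, PySem.Chars.slice_eq_listSlice,
        PySem.List.slice_toNat _ hj0 (by omega)]
    have hspsub : ∀ c ∈ sp.toList, c ∈ s.toList := by
      intro c hc; rw [hsplist] at hc
      exact List.mem_of_mem_drop (List.mem_of_mem_take hc)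
    by_cases hmem : sp ∈ pvCompList
    · have hne : sp ≠ "9" := by
        intro h
        apply h9
        apply hspsub
        rw [h]; decide
      have htok := pv_comp_tok sp hmem hne
      have hpre : sp.toList <+: s.toList.drop j.toNat := by
        rw [hsplist]; exact List.take_prefix _ _
      rw [if_pos hmem, pv_matchAt_some htok hpre]
      rfl
    · rw [if_neg hmem]
      have harec : pvAInner s j (PySem.List.pyRange (j + a + 1) ((s.toList.length : Int) + 1)) =
          (pvMatchAt (s.toList.drop j.toNat)).elim [] (fun v => [v]) := by
        have he : j + a + 1 = j + (a + 1) := by ring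
        rw [he]
        apply ih (a + 1) (by omega) _ (by omega)
        intro p hp hlp hpre
        by_cases hla : (p.1.toList.length : Int) < a
        · exact hinv p hp hla hpre
        · -- p has length exactly a and would be the splice itself, contradicting sp ∉ compList
          have hlen : p.1.toList.length = a.toNat := by omega
          have heq : p.1.toList = sp.toList := by
            rw [hsplist, (List.prefix_iff_eq_take).1 hpre, hlen]
            congr 1
            omega
          have hps : p.1 = sp := String.toList_inj.mp heq
          exact hmem (hps ▸ pv_keys_comp p hp)
      exact harec

lemma pv_innerA (s : String) (h9 : '9' ∉ s.toList) (j : Int) (hj0 : 0 ≤ j)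
    (hjn : j < (s.toList.length : Int)) :
    pvAInner s j (PySem.List.pyRange j ((s.toList.length : Int) + 1)) =
      (pvMatchAt (s.toList.drop j.toNat)).elim [] (fun v => [v]) := by
  rw [PySem.List.pyRange_one_cons (by omega : j < (s.toList.length : Int) + 1)]
  simp only [pvAInner]
  have hsp : (PySem.Str.slice s (some j) (some j)).toList = [] := by
    rw [PySem.Str.toList_slice, PySem.Chars.slice_eq_listSlice, PySem.List.slice_toNat _ hj0 hj0]
    simp
  have hnotmem : PySem.Str.slice s (some j) (some j) ∉ pvCompList := fun hm =>
    pv_comp_ne _ hm hsp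
  rw [if_neg hnotmem]
  apply pv_scanA s h9 j hj0 ((s.toList.length : Int) + 1 - (j + 1)).toNat 1 le_rfl _ rfl
  intro p hp hlp
  have := pv_tok_ne p hp
  omega

-- ---------- B's hit list, sorted, is the per-position match list ----------

-- the per-position hit list B's sort must reproduce
def pvTarget (s : String) : List (Int × String) :=
  (PySem.List.pyRange 0 (s.toList.length : Int)).filterMap
    (fun j => (pvMatchAt (s.toList.drop j.toNat)).map (fun v => (j, v)))

-- infix glue for moving the search window right
lemma pv_infix_drop_of_prefix_ge {t r : List Char} {k m : Nat} (hm : k ≤ m)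
    (h : t <+: r.drop m) : t <:+: r.drop k := by
  have hdd : (r.drop k).drop (m - k) = r.drop m := by
    rw [List.drop_drop]; congr 1; omega
  exact h.isInfix.trans (hdd ▸ (List.drop_suffix (m - k) (r.drop k)).isInfix)

-- stepping the start of s.find(tok, start) past a position where tok does not match
lemma pv_findFrom_step (r t : List Char) (k : Nat) (hk : k < r.length)
    (hnp : ¬ t <+: r.drop k) :
    PySem.Chars.findFrom r t ((k : Int) + 1) = PySem.Chars.findFrom r t (k : Int) := by
  have hcast : ((k : Int) + 1) = ((k + 1 : Nat) : Int) := by push_cast; ring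
  rw [hcast]
  have hsuf : r.drop (k + 1) <:+: r.drop k := by
    have hdd : (r.drop k).drop 1 = r.drop (k + 1) := by rw [List.drop_drop]
    exact hdd ▸ (List.drop_suffix 1 (r.drop k)).isInfix
  by_cases hnil : PySem.Chars.findFrom r t (k : Int) = -1
  · have hninf : ¬ t <:+: r.drop k :=
      (PySem.Chars.findFrom_natCast_eq_neg_one_iff r t k (by omega)).1 hnil
    rw [hnil,
      (PySem.Chars.findFrom_natCast_eq_neg_one_iff r t (k + 1) (by omega)).2
        (fun h => hninf (h.trans hsuf))]
  · obtain ⟨hge, hpre, hmin⟩ := PySem.Chars.findFrom_natCast_spec r t k (by omega) hnil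
    set res := PySem.Chars.findFrom r t (k : Int) with hres
    have hres0 : 0 ≤ res := le_trans (by omega) hge
    have hresk : k ≤ res.toNat := by omega
    have hresk1 : k + 1 ≤ res.toNat := by
      rcases Nat.eq_or_lt_of_le hresk with h | h
      · exact absurd (h ▸ hpre) hnp
      · omega
    have hne1 : PySem.Chars.findFrom r t ((k + 1 : Nat) : Int) ≠ -1 := by
      rw [Ne, PySem.Chars.findFrom_natCast_eq_neg_one_iff r t (k + 1) (by omega)]
      intro hno
      exact hno (pv_infix_drop_of_prefix_ge hresk1 hpre)
    obtain ⟨hge', hpre', hmin'⟩ := PySem.Chars.findFrom_natCast_spec r t (k + 1) (by omega) hne1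
    set res' := PySem.Chars.findFrom r t ((k + 1 : Nat) : Int) with hres'
    have hres0' : 0 ≤ res' := le_trans (by omega) hge'
    have h1 : ¬ res.toNat < res'.toNat := fun hlt => hmin' res.toNat hresk1 hlt hpre
    have h2 : ¬ res'.toNat < res.toNat := fun hlt => hmin res'.toNat (by omega) hlt hpre'
    omega

-- a match at the start position is found at the start position
lemma pv_findFrom_self (r t : List Char) (k : Nat) (hk : k ≤ r.length)
    (hp : t <+: r.drop k) : PySem.Chars.findFrom r t (k : Int) = (k : Int) := by
  have hne : PySem.Chars.findFrom r t (k : Int) ≠ -1 := by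
    rw [Ne, PySem.Chars.findFrom_natCast_eq_neg_one_iff r t k hk]
    intro hno
    exact hno hp.isInfix
  obtain ⟨hge, hpre, hmin⟩ := PySem.Chars.findFrom_natCast_spec r t k hk hne
  have h0 : 0 ≤ PySem.Chars.findFrom r t (k : Int) := le_trans (by omega) hge
  have : ¬ k < (PySem.Chars.findFrom r t (k : Int)).toNat := fun hlt =>
    hmin k (Nat.le_refl k) hlt hp
  omega

-- the find/while loop from start k collects exactly the match positions ≥ k, in order
lemma pv_occGo_eq (s : String) (tv : String × String) (ht : tv.1.toList ≠ []) :
    ∀ (d k : Nat), k ≤ s.toList.length → s.toList.length - k ≤ d →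
      ∀ fuel : Nat, s.toList.length + 1 - k ≤ fuel →
      pvOccGo s tv fuel (PySem.Chars.findFrom s.toList tv.1.toList (k : Int)) =
        ((PySem.List.pyRange (k : Int) (s.toList.length : Int)).filter
          (fun j => pvStartsAt s tv.1 j)).map (fun j => (j, tv.2)) := by
  intro d
  induction d with
  | zero =>
    intro k hk hd fuel _
    have hkl : k = s.toList.length := by omega
    have hnone : PySem.Chars.findFrom s.toList tv.1.toList (k : Int) = -1 := by
      rw [PySem.Chars.findFrom_natCast_eq_neg_one_iff s.toList tv.1.toList k hk,
        List.drop_eq_nil_of_le (by omega)]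
      simpa [List.infix_nil] using ht
    rw [hnone, PySem.List.pyRange_one_eq_nil (by exact_mod_cast Nat.le_of_eq hkl.symm)]
    cases fuel <;> simp [pvOccGo]
  | succ d ih =>
    intro k hk hd fuel hfuel
    rcases Nat.eq_or_lt_of_le hk with hkl | hkl
    · have hnone : PySem.Chars.findFrom s.toList tv.1.toList (k : Int) = -1 := by
        rw [PySem.Chars.findFrom_natCast_eq_neg_one_iff s.toList tv.1.toList k hk,
          List.drop_eq_nil_of_le (by omega)]
        simpa [List.infix_nil] using ht
      rw [hnone, PySem.List.pyRange_one_eq_nil (by exact_mod_cast Nat.le_of_eq hkl.symm)]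
      cases fuel <;> simp [pvOccGo]
    · have hcast : ((k : Int) + 1) = ((k + 1 : Nat) : Int) := by push_cast; ring
      have hrange : PySem.List.pyRange (k : Int) (s.toList.length : Int) =
          (k : Int) :: PySem.List.pyRange ((k + 1 : Nat) : Int) (s.toList.length : Int) := by
        rw [PySem.List.pyRange_one_cons (by exact_mod_cast hkl), hcast]
      by_cases hp : tv.1.toList <+: s.toList.drop k
      · rw [pv_findFrom_self s.toList tv.1.toList k hk hp]
        have hfe : ∃ f, fuel = f + 1 := ⟨fuel - 1, by omega⟩
        obtain ⟨f, rfl⟩ := hfe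
        have hknot : ¬ ((k : Int) = -1) := by omega
        simp only [pvOccGo, if_neg hknot]
        rw [PySem.Str.findFrom_eq, hcast, ih (k + 1) (by omega) (by omega) f (by omega)]
        have hsw : pvStartsAt s tv.1 (k : Int) = true := by
          unfold pvStartsAt
          rw [Int.toNat_natCast]
          exact (PySem.Chars.startswith_iff _ _).2 hp
        rw [hrange, List.filter_cons, hsw]
        simp
      · have hsw : pvStartsAt s tv.1 (k : Int) = false := by
          unfold pvStartsAt
          rw [Int.toNat_natCast]
          exact Bool.eq_false_iff.2 (fun hc => hp ((PySem.Chars.startswith_iff _ _).1 hc))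
        rw [← pv_findFrom_step s.toList tv.1.toList k hkl hp, hcast,
          ih (k + 1) (by omega) (by omega) fuel (by omega), hrange, List.filter_cons, hsw]
        simp

-- each token's while loop is the filtered position list
lemma pv_occ_eq {s : String} {tv : String × String} (htv : tv ∈ pvTokens) :
    pvOcc s tv = ((PySem.List.pyRange 0 (s.toList.length : Int)).filter
      (fun j => pvStartsAt s tv.1 j)).map (fun j => (j, tv.2)) := by
  have ht : tv.1.toList ≠ [] := by
    have := pv_tok_ne tv htv
    intro h
    rw [h] at this
    simp at this
  unfold pvOcc
  rw [PySem.Str.find_eq, ← PySem.Chars.findFrom_zero]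
  have h0 : (0 : Int) = ((0 : Nat) : Int) := rfl
  rw [h0]
  exact pv_occGo_eq s tv ht s.toList.length 0 (Nat.zero_le _) (by omega)
    (s.toList.length + 1) (by omega)

lemma pv_hits_eq (s : String) :
    pvHits s = pvTokens.flatMap (fun tv =>
      ((PySem.List.pyRange 0 (s.toList.length : Int)).filter (fun j => pvStartsAt s tv.1 j)).map
        (fun j => (j, tv.2))) := by
  unfold pvHits
  refine Eq.trans (PySem.List.foldl_congr_mem _ _
    (fun hits tv => hits ++
      ((PySem.List.pyRange 0 (s.toList.length : Int)).filter (fun j => pvStartsAt s tv.1 j)).map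
        (fun j => (j, tv.2))) []
    (fun acc tv htv => by rw [pv_occ_eq htv])) ?_
  simpa using PySem.List.foldl_append_eq_flatMap _ pvTokens ([] : List (Int × String))

lemma pv_mem_hits {s : String} {j : Int} {v : String} :
    (j, v) ∈ pvHits s ↔
      ∃ p ∈ pvTokens, (0 ≤ j ∧ j < (s.toList.length : Int)) ∧
        p.1.toList <+: s.toList.drop j.toNat ∧ p.2 = v := by
  rw [pv_hits_eq]
  simp only [List.mem_flatMap, List.mem_map, List.mem_filter, PySem.List.mem_pyRange_one]
  constructor
  · rintro ⟨tv, htv, k, ⟨⟨hk0, hkn⟩, hsw⟩, hkv⟩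
    cases hkv
    exact ⟨tv, htv, ⟨hk0, hkn⟩, (PySem.Chars.startswith_iff _ _).1 hsw, rfl⟩
  · rintro ⟨p, hp, ⟨hj0, hjn⟩, hpre, rfl⟩
    exact ⟨p, hp, j, ⟨⟨hj0, hjn⟩, (PySem.Chars.startswith_iff _ _).2 hpre⟩, rfl⟩

lemma pv_mem_target {s : String} {j : Int} {v : String} :
    (j, v) ∈ pvTarget s ↔
      (0 ≤ j ∧ j < (s.toList.length : Int)) ∧ pvMatchAt (s.toList.drop j.toNat) = some v := by
  unfold pvTarget
  simp only [List.mem_filterMap, PySem.List.mem_pyRange_one, Option.map_eq_some_iff]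
  constructor
  · rintro ⟨k, hk, w, hw, hkv⟩
    cases hkv
    exact ⟨hk, hw⟩
  · rintro ⟨hj, hm⟩
    exact ⟨j, hj, v, hm, rfl⟩

lemma pv_mem_hits_iff_target {s : String} {h : Int × String} :
    h ∈ pvHits s ↔ h ∈ pvTarget s := by
  obtain ⟨j, v⟩ := h
  rw [pv_mem_hits, pv_mem_target]
  constructor
  · rintro ⟨p, hp, hj, hpre, rfl⟩
    exact ⟨hj, pv_matchAt_some hp hpre⟩
  · rintro ⟨hj, hm⟩
    obtain ⟨p, hp, hpre, rfl⟩ := pv_matchAt_some_iff.1 hm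
    exact ⟨p, hp, hj, hpre, rfl⟩

lemma pv_pyRange_zero_nodup (n : Nat) : (PySem.List.pyRange 0 (n : Int)).Nodup := by
  rw [PySem.List.pyRange_zero_natCast]
  exact List.nodup_range.map (fun a b h => by exact_mod_cast h)

lemma pv_hits_nodup (s : String) : (pvHits s).Nodup := by
  rw [pv_hits_eq]
  rw [List.nodup_flatMap]
  constructor
  · intro tv _
    apply List.Nodup.map
    · intro a b h
      exact (Prod.mk.injEq _ _ _ _ ▸ h).1
    · exact ((pv_pyRange_zero_nodup s.toList.length).filter _)
  · apply List.Pairwise.imp_of_mem _ pv_tokens_nodup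
    intro p q hp hq hne x hxp hxq
    simp only [List.mem_map, List.mem_filter] at hxp hxq
    obtain ⟨j, ⟨_, hswp⟩, rfl⟩ := hxp
    obtain ⟨k, ⟨_, hswq⟩, hk⟩ := hxq
    have hjk : k = j := (Prod.mk.injEq _ _ _ _ ▸ hk.symm).1.symm
    subst hjk
    exact hne (pv_uniq_at hp hq
      ((PySem.Chars.startswith_iff _ _).1 hswp)
      ((PySem.Chars.startswith_iff _ _).1 hswq))

lemma pv_target_pairwise (s : String) :
    (pvTarget s).Pairwise (fun a b => a.1 < b.1) := by
  unfold pvTarget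
  rw [List.pairwise_filterMap]
  have : (PySem.List.pyRange 0 (s.toList.length : Int)).Pairwise (· < ·) := by
    rw [PySem.List.pyRange_zero_natCast]
    exact List.pairwise_lt_range.map _ (fun a b h => by exact_mod_cast h)
  apply this.imp_of_mem
  intro a b _ _ hab x hx y hy
  rw [Option.map_eq_some_iff] at hx hy
  obtain ⟨_, _, rfl⟩ := hx
  obtain ⟨_, _, rfl⟩ := hy
  exact hab

lemma pv_target_nodup (s : String) : (pvTarget s).Nodup :=
  (pv_target_pairwise s).imp (fun h => by intro he; subst he; exact lt_irrefl _ h)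

lemma pv_sorted_hits (s : String) :
    PySem.List.sorted (pvHits s) (fun h => h.1) = pvTarget s := by
  apply PySem.List.sorted_eq_of_perm_of_pairwise_lt
  · exact (List.perm_ext_iff_of_nodup (pv_target_nodup s) (pv_hits_nodup s)).2
      (fun a => pv_mem_hits_iff_target.symm)
  · exact pv_target_pairwise s

lemma pv_map_snd_filterMap (l : List Int) (f : Int → Option String) :
    (l.filterMap (fun j => (f j).map (fun v => (j, v)))).map (fun h => h.2) =
      l.flatMap (fun j => (f j).elim [] (fun v => [v])) := by
  induction l with
  | nil => rfl
  | cons x xs ih =>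
    cases hx : f x <;>
      simp only [List.filterMap_cons, List.flatMap_cons, hx, Option.map_none, Option.map_some,
        Option.elim, List.map_cons, List.nil_append, List.cons_append, ih]

-- ---------- the two steps agree ----------
lemma pv_stepEq (acc : List String) (s : String)
    (hs : PySem.Str.strIsdigit s = true ∨ '9' ∉ s.toList) :
    pvStepA acc s = pvStepB acc s := by
  unfold pvStepA pvStepB
  by_cases hd : PySem.Str.strIsdigit s = true
  · rw [if_pos hd, if_pos hd]
  · have h9 : '9' ∉ s.toList := hs.resolve_left hd
    rw [if_neg hd, if_neg hd]
    simp only [PySem.Str.len_eq]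
    rw [pv_sorted_hits]
    unfold pvTarget
    rw [pv_map_snd_filterMap]
    refine Eq.trans (PySem.List.foldl_congr_mem _ _
      (fun a (j : Int) => a ++ (pvMatchAt (s.toList.drop j.toNat)).elim [] (fun v => [v])) acc
      ?_) (PySem.List.foldl_append_eq_flatMap _ _ acc)
    intro a j hj
    rw [PySem.List.mem_pyRange_one] at hj
    rw [pv_innerA s h9 j hj.1 hj.2]

lemma pv_foldlEq (l : List String) (acc : List String)
    (h : ∀ s ∈ l, PySem.Str.strIsdigit s = true ∨ '9' ∉ s.toList) :
    l.foldl pvStepA acc = l.foldl pvStepB acc := by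
  induction l generalizing acc with
  | nil => rfl
  | cons x xs ih =>
    simp only [List.foldl_cons]
    rw [pv_stepEq acc x (h x (List.mem_cons_self))]
    exact ih _ (fun s hs => h s (List.mem_cons_of_mem x hs))

-- ===== VERDICT (by name: the statement is the Claim_ definition above) =====
theorem resplit_spec : Claim_equal_resplit := by
  intro origLine _ hPre
  show resplit origLine = resplit_alt origLine
  exact pv_foldlEq origLine [] hPre
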